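-- pv_equiv track=rewrite | github.com/mlboaquin/OptiPy | src/imageToCode/tesseract_extract.py | _fix_programming_keywords
-- ===== SOURCE A (Python) =====
-- def _fix_programming_keywords(content):
--     """Fix common programming keywords and patterns"""
--     # Common programming keywords that might be misrecognized
--     keyword_fixes = {
--         'def1ne': 'define',
--         'pr1nt': 'print',
--         'funct1on': 'function',
--         'wh1le': 'while',
--         'ret urn': 'return',
--         'y1eld': 'yield',
--         'ra1se': 'raise',
--         'cont1nue': 'continue',
--         'pass word': 'password',
--         'class ': 'class ',  # Keep the space after class
--     }
--
--     for old, new in keyword_fixes.items():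
--         content = content.replace(old, new)
--
--     # Fix common code patterns
--     if content.strip().startswith('//'):  # Convert // comments to # for Python
--         content = content.replace('//', '#', 1)
--
--     return content
-- ===== SOURCE B (Python) =====
-- # One-pass table-driven rewrite instead of ten sequential str.replace passes.
-- # 'def1ne' is normalized first (its match can begin at the final 'd' of a
-- # 'y1eld'/'pass word' match, so it cannot join the one-pass table); the
-- # remaining eight fixes are mutually non-overlapping and their replacements
-- # never create new matches, so a single left-to-right scan applies them all.
-- _TABLE = [
--     ('pr1nt', 'print'),
--     ('funct1on', 'function'),
--     ('wh1le', 'while'),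
--     ('ret urn', 'return'),
--     ('y1eld', 'yield'),
--     ('ra1se', 'raise'),
--     ('cont1nue', 'continue'),
--     ('pass word', 'password'),
-- ]
--
--
-- def _fix_programming_keywords(content):
--     """Fix common programming keywords and patterns"""
--     content = content.replace('def1ne', 'define')
--     out = []
--     i = 0
--     n = len(content)
--     while i < n:
--         for old, new in _TABLE:
--             if content.startswith(old, i):
--                 out.append(new)
--                 i += len(old)
--                 break
--         else:
--             out.append(content[i])
--             i += 1
--     content = ''.join(out)
--     if content.strip().startswith('//'):  # Convert // comments to # for Python
--         content = content.replace('//', '#', 1)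
--     return content
-- ===== Notes on version B (the rewrite author's own statement) =====
-- stated objective: alternative
-- what changed: Replaces A's ten sequential full-string replace passes (one per dictionary entry, including the no-op 'class ' entry) by one preliminary 'def1ne' replace plus a single left-to-right scan that applies the eight remaining non-overlapping fixes from a table in one pass; the '//'-comment conversion is kept as in A.
import Mathlib
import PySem

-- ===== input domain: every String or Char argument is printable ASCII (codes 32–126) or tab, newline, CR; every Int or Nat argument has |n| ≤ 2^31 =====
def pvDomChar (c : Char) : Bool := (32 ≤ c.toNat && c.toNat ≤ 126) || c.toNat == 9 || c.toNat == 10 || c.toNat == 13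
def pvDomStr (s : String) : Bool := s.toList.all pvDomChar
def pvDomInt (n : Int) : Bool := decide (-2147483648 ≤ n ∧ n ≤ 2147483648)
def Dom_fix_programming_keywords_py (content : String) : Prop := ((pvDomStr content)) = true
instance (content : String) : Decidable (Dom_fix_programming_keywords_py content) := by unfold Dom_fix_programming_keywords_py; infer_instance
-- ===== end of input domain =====

-- B replaces A's ten sequential full-string replace passes by one 'def1ne' replace pass plus a
-- single left-to-right table-driven scan for the eight remaining fixes (objective: alternative).

-- ===== PORT A =====
-- exact port of content.replace(old, new, 1) for nonempty old: replaces only the first occurrence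
def pyReplaceOnce (s old new : List Char) : List Char :=
  match s with
  | [] => []
  | c :: t =>
    if old.isPrefixOf (c :: t) then new ++ (c :: t).drop old.length
    else c :: pyReplaceOnce t old new

def kwFixes : List (List Char × List Char) :=
  [("def1ne".toList, "define".toList),
   ("pr1nt".toList, "print".toList),
   ("funct1on".toList, "function".toList),
   ("wh1le".toList, "while".toList),
   ("ret urn".toList, "return".toList),
   ("y1eld".toList, "yield".toList),
   ("ra1se".toList, "raise".toList),
   ("cont1nue".toList, "continue".toList),
   ("pass word".toList, "password".toList),
   ("class ".toList, "class ".toList)]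

def fix_programming_keywords_py (content : String) : String :=
  let cs := kwFixes.foldl (fun s q => PySem.Chars.replace s q.1 q.2) content.toList
  let cs := if PySem.Chars.startswith (PySem.Chars.strip cs) "//".toList
            then pyReplaceOnce cs "//".toList "#".toList else cs
  String.mk cs

-- ===== PORT B =====
def kwTable : List (List Char × List Char) :=
  [("pr1nt".toList, "print".toList),
   ("funct1on".toList, "function".toList),
   ("wh1le".toList, "while".toList),
   ("ret urn".toList, "return".toList),
   ("y1eld".toList, "yield".toList),
   ("ra1se".toList, "raise".toList),
   ("cont1nue".toList, "continue".toList),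
   ("pass word".toList, "password".toList)]

-- termination helper for scanFix (cited in its decreasing_by)
lemma kwTable_key_pos : ∀ q ∈ kwTable, 0 < q.1.length := by decide

-- bridge between Bool isPrefixOf and the prefix relation (cited by scanFix's decreasing_by)
lemma prefIff : ∀ (l₁ l₂ : List Char), l₁.isPrefixOf l₂ = true ↔ l₁ <+: l₂ := by
  intro l₁
  induction l₁ with
  | nil => intro l₂; simp [List.isPrefixOf]
  | cons a l ih => intro l₂; cases l₂ <;> simp [List.isPrefixOf, List.cons_prefix_cons, ih]

-- B's inner loop: at each position take the first table entry whose key starts here, else copy a char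
def scanFix : List Char → List Char
  | [] => []
  | c :: t =>
    match hf : kwTable.find? (fun q => q.1.isPrefixOf (c :: t)) with
    | some q => q.2 ++ scanFix ((c :: t).drop q.1.length)
    | none => c :: scanFix t
termination_by cs => cs.length
decreasing_by
  · have hq : q ∈ kwTable := List.mem_of_find?_eq_some hf
    have hp : q.1 <+: c :: t := (prefIff _ _).mp (by simpa using List.find?_some hf)
    have h1 : 0 < q.1.length := kwTable_key_pos q hq
    have h2 : q.1.length ≤ (c :: t).length := hp.length_le
    simp only [List.length_drop, List.length_cons]
    omega
  · simp only [List.length_cons]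
    omega

def fix_programming_keywords_py_alt (content : String) : String :=
  let cs := PySem.Chars.replace content.toList "def1ne".toList "define".toList
  let cs := scanFix cs
  let cs := if PySem.Chars.startswith (PySem.Chars.strip cs) "//".toList
            then pyReplaceOnce cs "//".toList "#".toList else cs
  String.mk cs

-- ===== PRECONDITION & SPEC =====
def Spec_fix_programming_keywords_py (content : String) (out : String) : Prop := out = fix_programming_keywords_py_alt content
instance (content : String) (out : String) : Decidable (Spec_fix_programming_keywords_py content out) := by unfold Spec_fix_programming_keywords_py; infer_instance

-- ===== CLAIM (what is proved, stated in full; the proofs are below) =====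
def Claim_equal_fix_programming_keywords_py : Prop := ∀ (content : String), Dom_fix_programming_keywords_py content → Spec_fix_programming_keywords_py content (fix_programming_keywords_py content)

-- ===== LEMMAS AND PROOFS =====

-- Python's str.replace(old, new) (all occurrences), written structurally
def repFix (k r : List Char) : List Char → List Char
  | [] => []
  | c :: t =>
    if h : 0 < k.length ∧ k.isPrefixOf (c :: t) = true
    then r ++ repFix k r ((c :: t).drop k.length)
    else c :: repFix k r t
termination_by cs => cs.length
decreasing_by
  · simp only [List.length_drop, List.length_cons]; omega
  · simp

lemma go_nil (old new : List Char) : ∀ fuel acc, PySem.Chars.replace.go old new fuel [] acc = acc.reverse := by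
  intro fuel acc
  cases fuel <;> simp [PySem.Chars.replace.go]

lemma go_spec (old new : List Char) (hold : old ≠ []) :
    ∀ (fuel : Nat) (l acc : List Char), l.length ≤ fuel →
      PySem.Chars.replace.go old new fuel l acc = acc.reverse ++ repFix old new l := by
  intro fuel
  induction fuel with
  | zero =>
    intro l acc h
    have hl : l = [] := List.eq_nil_of_length_eq_zero (Nat.le_zero.mp h)
    subst hl
    rw [go_nil, repFix]
    simp
  | succ n ih =>
    intro l acc h
    match l with
    | [] => rw [go_nil, repFix]; simp
    | c :: t =>
      rw [PySem.Chars.replace.go, repFix]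
      by_cases hp : old.isPrefixOf (c :: t) = true
      · have hpos : 0 < old.length := List.length_pos_of_ne_nil hold
        rw [if_pos hp, dif_pos ⟨hpos, hp⟩, ih _ _ (by simp at h ⊢; omega)]
        simp
      · rw [if_neg hp, dif_neg (by simp [hp]), ih _ _ (by simp at h ⊢; omega)]
        simp

lemma replace_eq_repFix (s k r : List Char) (hk : k ≠ []) :
    PySem.Chars.replace s k r = repFix k r s := by
  rw [PySem.Chars.replace, if_neg (by simp [hk]), go_spec k r hk s.length s [] le_rfl]
  simp

-- replacing a pattern by itself is the identity (A's 'class ' pass)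
lemma repFix_self (k : List Char) : ∀ s, repFix k k s = s := by
  intro s
  induction hn : s.length using Nat.strong_induction_on generalizing s with
  | _ n ih =>
    match s with
    | [] => rw [repFix]
    | c :: t =>
      rw [repFix]
      split
      · rename_i h
        have hk0 : 0 < k.length := h.1
        have hp : k <+: c :: t := (prefIff _ _).mp h.2
        obtain ⟨t', ht'⟩ := hp
        subst hn
        rw [← ht', List.drop_left, ih t'.length (by rw [← ht']; simp; omega) t' rfl]
      · subst hn
        rw [ih t.length (by simp) t rfl]

-- k can match somewhere in v ++ t (for some t) only if the pattern and v agree on their overlap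
def compatB (k v : List Char) : Bool := k.take v.length == v.take k.length

lemma not_prefix_append_of_compat_false {k v : List Char} (h : compatB k v = false) (t : List Char) :
    ¬ k <+: v ++ t := by
  intro hp
  have hk := List.prefix_iff_eq_take.mp hp
  have hv : v = (v ++ t).take v.length := by simp
  have : compatB k v = true := by
    have h1 : k.take v.length = (v ++ t).take (min v.length k.length) := by
      conv_lhs => rw [hk]
      rw [List.take_take]
    have h2 : v.take k.length = (v ++ t).take (min k.length v.length) := by
      conv_lhs => rw [hv]
      rw [List.take_take]
    simp only [compatB, beq_iff_eq]
    rw [h1, h2, Nat.min_comm]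
  rw [h] at this
  exact Bool.false_ne_true this

-- peel an untouched block u off the front of a replace pass
lemma peel (k r u t : List Char)
    (h : ∀ p, p < u.length → ¬ k <+: (u.drop p ++ t)) :
    repFix k r (u ++ t) = u ++ repFix k r t := by
  induction u with
  | nil => simp
  | cons a u ih =>
    have h0 : ¬ k <+: (a :: u) ++ t := by simpa using h 0 (by simp)
    rw [List.cons_append, repFix, dif_neg]
    · rw [ih (fun p hp => by simpa using h (p + 1) (by simp; omega))]
      rfl
    · rintro ⟨-, hpre⟩
      exact h0 (by simpa using (prefIff _ _).mp hpre)

lemma peelC (k r u : List Char)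
    (h : ∀ p, p < u.length → compatB k (u.drop p) = false) (t : List Char) :
    repFix k r (u ++ t) = u ++ repFix k r t :=
  peel k r u t (fun p hp => not_prefix_append_of_compat_false (h p hp) t)

lemma headMatch (k r t : List Char) (hk : k ≠ []) :
    repFix k r (k ++ t) = r ++ repFix k r t := by
  match hk2 : k with
  | c :: k' =>
    rw [List.cons_append, repFix, dif_pos]
    · rw [show (c :: (k' ++ t)).drop (c :: k').length = t by
        have : ((c :: k') ++ t).drop (c :: k').length = t := List.drop_left
        simpa using this]
    · exact ⟨by simp, (prefIff _ _).mpr (by simpa using List.prefix_append (c :: k') t)⟩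

-- fold of repFix over a pair list
def compList (L : List (List Char × List Char)) (cs : List Char) : List Char :=
  L.foldl (fun s q => repFix q.1 q.2 s) cs

lemma compList_cons (k r : List Char) (L : List (List Char × List Char)) (cs : List Char) :
    compList ((k, r) :: L) cs = compList L (repFix k r cs) := rfl

lemma compList_nil_input : ∀ L, compList L [] = [] := by
  intro L
  induction L with
  | nil => rfl
  | cons q L ih => rw [show compList (q :: L) [] = compList L (repFix q.1 q.2 []) from rfl, repFix, ih]

lemma foldPeel (L : List (List Char × List Char)) (u : List Char)
    (h : ∀ q ∈ L, ∀ p, p < u.length → compatB q.1 (u.drop p) = false) :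
    ∀ t, compList L (u ++ t) = u ++ compList L t := by
  induction L with
  | nil => intro t; rfl
  | cons q L ih =>
    intro t
    rw [show compList (q :: L) (u ++ t) = compList L (repFix q.1 q.2 (u ++ t)) from rfl,
        peelC q.1 q.2 u (h q (by simp)) t,
        ih (fun q' hq' => h q' (by simp [hq'])) (repFix q.1 q.2 t)]
    rfl

lemma foldMatch (L1 L2 : List (List Char × List Char)) (k r : List Char) (hk : k ≠ [])
    (hA : ∀ q ∈ L1, ∀ p, p < k.length → compatB q.1 (k.drop p) = false)
    (hB : ∀ q ∈ L2, ∀ p, p < r.length → compatB q.1 (r.drop p) = false)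
    (t : List Char) :
    compList (L1 ++ (k, r) :: L2) (k ++ t) = r ++ compList (L1 ++ (k, r) :: L2) t := by
  unfold compList
  rw [List.foldl_append, List.foldl_append]
  show compList ((k, r) :: L2) (compList L1 (k ++ t)) = r ++ compList ((k, r) :: L2) (compList L1 t)
  rw [foldPeel L1 k hA t, compList_cons, compList_cons, headMatch k r _ hk,
      foldPeel L2 r hB (repFix k r (compList L1 t))]

-- every nonempty proper suffix of a table key
def Frag : List (List Char) :=
  [" urn".toList, " word".toList, "1eld".toList, "1le".toList, "1nt".toList, "1nue".toList,
   "1on".toList, "1se".toList, "a1se".toList, "ass word".toList, "ct1on".toList, "d".toList,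
   "e".toList, "eld".toList, "et urn".toList, "h1le".toList, "ld".toList, "le".toList,
   "n".toList, "nct1on".toList, "nt".toList, "nt1nue".toList, "nue".toList, "on".toList,
   "ont1nue".toList, "ord".toList, "r1nt".toList, "rd".toList, "rn".toList, "s word".toList,
   "se".toList, "ss word".toList, "t".toList, "t urn".toList, "t1nue".toList, "t1on".toList,
   "ue".toList, "unct1on".toList, "urn".toList, "word".toList]

lemma fragFact : ∀ f ∈ Frag, ∀ q ∈ kwTable,
    ¬ q.2.isPrefixOf f = true ∧ (¬ f.isPrefixOf q.2 = true ∨ f.isPrefixOf q.1 = true) := by decide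

lemma fragTail : ∀ f ∈ Frag, f.tail = [] ∨ f.tail ∈ Frag := by decide

lemma keyTail : ∀ q ∈ kwTable, q.1 ≠ [] ∧ q.1.tail ∈ Frag := by decide

-- no replace pass creates a new occurrence of a key fragment at the front
lemma noCreate : ∀ (t f : List Char), f ∈ Frag → ∀ k r, (k, r) ∈ kwTable →
    f <+: repFix k r t → f <+: t := by
  intro t
  induction t with
  | nil => intro f _ k r _ h; rw [repFix] at h; exact h
  | cons c t ih =>
    intro f hf k r hkr h
    rw [repFix] at h
    split at h
    · rename_i hg
      rcases List.prefix_or_prefix_of_prefix h (List.prefix_append r _) with hfr | hrf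
      · rcases (fragFact f hf (k, r) hkr).2 with hnfr | hfk
        · exact absurd ((prefIff _ _).mpr hfr) hnfr
        · exact ((prefIff _ _).mp hfk).trans ((prefIff _ _).mp hg.2)
      · exact absurd ((prefIff _ _).mpr hrf) (fragFact f hf (k, r) hkr).1
    · match f with
      | [] => exact List.nil_prefix
      | fh :: ft =>
        obtain ⟨hfh, hft⟩ := List.cons_prefix_cons.mp h
        subst hfh
        by_cases hft0 : ft = []
        · subst hft0
          exact List.cons_prefix_cons.mpr ⟨rfl, List.nil_prefix⟩
        · rcases fragTail (fh :: ft) hf with htl | htl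
          · exact absurd (by simpa using htl) hft0
          · exact List.cons_prefix_cons.mpr ⟨rfl, ih ft (by simpa using htl) k r hkr hft⟩

lemma pres (c : Char) (s k r : List Char) (hkr : (k, r) ∈ kwTable)
    (h : ∀ q ∈ kwTable, ¬ q.1 <+: c :: s) :
    ∀ q ∈ kwTable, ¬ q.1 <+: c :: repFix k r s := by
  intro q hq hcon
  obtain ⟨hne, htf⟩ := keyTail q hq
  match hq1 : q.1 with
  | [] => exact hne hq1
  | qh :: qt =>
    rw [hq1] at hcon
    obtain ⟨hqh, hqt⟩ := List.cons_prefix_cons.mp hcon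
    subst hqh
    have : qt <+: s := noCreate s qt (by rw [hq1] at htf; simpa using htf) k r hkr hqt
    exact h q hq (by rw [hq1]; exact List.cons_prefix_cons.mpr ⟨rfl, this⟩)

lemma headStep (L : List (List Char × List Char)) (hL : ∀ q ∈ L, q ∈ kwTable) (c : Char) :
    ∀ s, (∀ q ∈ kwTable, ¬ q.1 <+: c :: s) → compList L (c :: s) = c :: compList L s := by
  induction L with
  | nil => intro s _; rfl
  | cons q L ih =>
    intro s h
    have hqmem : q ∈ kwTable := hL q (by simp)
    have hrep : repFix q.1 q.2 (c :: s) = c :: repFix q.1 q.2 s := by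
      rw [repFix, dif_neg]
      rintro ⟨-, hpre⟩
      exact h q hqmem ((prefIff _ _).mp hpre)
    rw [compList_cons, hrep, ih (fun q' hq' => hL q' (by simp [hq'])) (repFix q.1 q.2 s)
          (pres c s q.1 q.2 (by simpa using hqmem) h), compList_cons]

-- the eight case lemmas: a key match at the front commutes with the whole fold
lemma caseStep (L1 L2 : List (List Char × List Char)) (k r : List Char)
    (hsplit : kwTable = L1 ++ (k, r) :: L2) (hk : k ≠ [])
    (hA : ∀ q ∈ L1, ∀ p, p < k.length → compatB q.1 (k.drop p) = false)
    (hB : ∀ q ∈ L2, ∀ p, p < r.length → compatB q.1 (r.drop p) = false)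
    (t : List Char) :
    compList kwTable (k ++ t) = r ++ compList kwTable t := by
  rw [hsplit]
  exact foldMatch L1 L2 k r hk hA hB t

lemma scanFix_nil : scanFix [] = [] := by
  rw [scanFix]

lemma scanFix_cons_some {c : Char} {t : List Char} {q : List Char × List Char}
    (hf : kwTable.find? (fun q => q.1.isPrefixOf (c :: t)) = some q) :
    scanFix (c :: t) = q.2 ++ scanFix ((c :: t).drop q.1.length) := by
  rw [scanFix]
  split
  · rename_i q' hf'
    rw [hf'] at hf
    cases hf
    rfl
  · rename_i hf'
    rw [hf'] at hf
    cases hf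

lemma scanFix_cons_none {c : Char} {t : List Char}
    (hf : kwTable.find? (fun q => q.1.isPrefixOf (c :: t)) = none) :
    scanFix (c :: t) = c :: scanFix t := by
  rw [scanFix]
  split
  · rename_i q' hf'
    rw [hf'] at hf
    cases hf
  · rfl

theorem main_scan : ∀ cs, compList kwTable cs = scanFix cs := by
  intro cs
  induction hn : cs.length using Nat.strong_induction_on generalizing cs with
  | _ n ih =>
    match cs, hn with
    | [], hn => rw [scanFix_nil]; exact compList_nil_input kwTable
    | c :: t0, hn =>
      match hfind : kwTable.find? (fun q => q.1.isPrefixOf (c :: t0)) with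
      | some q =>
        have hq : q ∈ kwTable := List.mem_of_find?_eq_some hfind
        have hp : q.1 <+: c :: t0 := (prefIff _ _).mp (by simpa using List.find?_some hfind)
        have hkne : q.1 ≠ [] := (keyTail q hq).1
        obtain ⟨t, ht⟩ := hp
        have hlen : t.length < n := by
          rw [← hn, ← ht]
          have : 0 < q.1.length := List.length_pos_of_ne_nil hkne
          simp only [List.length_append]
          omega
        have iht : compList kwTable t = scanFix t := ih t.length hlen t rfl
        have hdrop : (c :: t0).drop q.1.length = t := by
          rw [← ht, List.drop_left]
        rw [scanFix_cons_some hfind, hdrop, ← iht, ← ht]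
        simp only [kwTable, List.mem_cons, List.not_mem_nil, or_false] at hq
        rcases hq with rfl | rfl | rfl | rfl | rfl | rfl | rfl | rfl
        · exact caseStep [] [("funct1on".toList, "function".toList), ("wh1le".toList, "while".toList), ("ret urn".toList, "return".toList), ("y1eld".toList, "yield".toList), ("ra1se".toList, "raise".toList), ("cont1nue".toList, "continue".toList), ("pass word".toList, "password".toList)] "pr1nt".toList "print".toList rfl (by decide) (by decide) (by decide) t
        · exact caseStep [("pr1nt".toList, "print".toList)] [("wh1le".toList, "while".toList), ("ret urn".toList, "return".toList), ("y1eld".toList, "yield".toList), ("ra1se".toList, "raise".toList), ("cont1nue".toList, "continue".toList), ("pass word".toList, "password".toList)] "funct1on".toList "function".toList rfl (by decide) (by decide) (by decide) t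
        · exact caseStep [("pr1nt".toList, "print".toList), ("funct1on".toList, "function".toList)] [("ret urn".toList, "return".toList), ("y1eld".toList, "yield".toList), ("ra1se".toList, "raise".toList), ("cont1nue".toList, "continue".toList), ("pass word".toList, "password".toList)] "wh1le".toList "while".toList rfl (by decide) (by decide) (by decide) t
        · exact caseStep [("pr1nt".toList, "print".toList), ("funct1on".toList, "function".toList), ("wh1le".toList, "while".toList)] [("y1eld".toList, "yield".toList), ("ra1se".toList, "raise".toList), ("cont1nue".toList, "continue".toList), ("pass word".toList, "password".toList)] "ret urn".toList "return".toList rfl (by decide) (by decide) (by decide) t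
        · exact caseStep [("pr1nt".toList, "print".toList), ("funct1on".toList, "function".toList), ("wh1le".toList, "while".toList), ("ret urn".toList, "return".toList)] [("ra1se".toList, "raise".toList), ("cont1nue".toList, "continue".toList), ("pass word".toList, "password".toList)] "y1eld".toList "yield".toList rfl (by decide) (by decide) (by decide) t
        · exact caseStep [("pr1nt".toList, "print".toList), ("funct1on".toList, "function".toList), ("wh1le".toList, "while".toList), ("ret urn".toList, "return".toList), ("y1eld".toList, "yield".toList)] [("cont1nue".toList, "continue".toList), ("pass word".toList, "password".toList)] "ra1se".toList "raise".toList rfl (by decide) (by decide) (by decide) t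
        · exact caseStep [("pr1nt".toList, "print".toList), ("funct1on".toList, "function".toList), ("wh1le".toList, "while".toList), ("ret urn".toList, "return".toList), ("y1eld".toList, "yield".toList), ("ra1se".toList, "raise".toList)] [("pass word".toList, "password".toList)] "cont1nue".toList "continue".toList rfl (by decide) (by decide) (by decide) t
        · exact caseStep [("pr1nt".toList, "print".toList), ("funct1on".toList, "function".toList), ("wh1le".toList, "while".toList), ("ret urn".toList, "return".toList), ("y1eld".toList, "yield".toList), ("ra1se".toList, "raise".toList), ("cont1nue".toList, "continue".toList)] [] "pass word".toList "password".toList rfl (by decide) (by decide) (by decide) t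
      | none =>
        have hnone : ∀ q ∈ kwTable, ¬ q.1 <+: c :: t0 := by
          intro q hq hpre
          have := List.find?_eq_none.mp hfind q hq
          simp only at this
          exact this ((prefIff _ _).mpr hpre)
        have iht : compList kwTable t0 = scanFix t0 := by
          apply ih t0.length (by rw [← hn]; simp) t0 rfl
        rw [scanFix_cons_none hfind, headStep kwTable (fun q hq => hq) c t0 hnone, iht]

-- A's ten replace passes equal B's one replace pass followed by the scan
lemma fold_eq_scan (cs : List Char) :
    kwFixes.foldl (fun s q => PySem.Chars.replace s q.1 q.2) cs
      = scanFix (PySem.Chars.replace cs "def1ne".toList "define".toList) := by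
  simp only [kwFixes, List.foldl_cons, List.foldl_nil]
  rw [replace_eq_repFix _ "class ".toList "class ".toList (by decide),
      repFix_self,
      replace_eq_repFix _ "pass word".toList "password".toList (by decide),
      replace_eq_repFix _ "cont1nue".toList "continue".toList (by decide),
      replace_eq_repFix _ "ra1se".toList "raise".toList (by decide),
      replace_eq_repFix _ "y1eld".toList "yield".toList (by decide),
      replace_eq_repFix _ "ret urn".toList "return".toList (by decide),
      replace_eq_repFix _ "wh1le".toList "while".toList (by decide),
      replace_eq_repFix _ "funct1on".toList "function".toList (by decide),
      replace_eq_repFix _ "pr1nt".toList "print".toList (by decide)]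
  have h := main_scan (PySem.Chars.replace cs "def1ne".toList "define".toList)
  simp only [compList, kwTable, List.foldl_cons, List.foldl_nil] at h
  exact h

-- ===== VERDICT (by name: the statement is the Claim_ definition above) =====
theorem fix_programming_keywords_py_spec : Claim_equal_fix_programming_keywords_py := by
  intro content _
  unfold Spec_fix_programming_keywords_py
  simp only [fix_programming_keywords_py, fix_programming_keywords_py_alt]
  rw [fold_eq_scan]
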